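-- pv_equiv track=rewrite | github.com/wyk18703232953/myResearch | codeComplex/data/filteredData/python/quadratic/python_quadratic_0582.py | solve
-- ===== SOURCE A (Python) =====
-- def solve(n, k, s):
--     sf = 'RGB' * (k + 2)
--
--     max_s = 0
--     for i in range(n - k + 1):
--         for j in range(3):
--             count = 0
--             for b in range(k):
--                 if sf[j + b] == s[i + b]:
--                     count += 1
--             if count > max_s:
--                 max_s = count
--
--     return k - max_s
-- ===== SOURCE B (Python) =====
-- def solve(n, k, s):
--     # Prefix sums of per-phase matches; each window is answered by one subtraction.
--     if k <= 0 or n < k: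
--         return k
--     best = 0
--     for r in range(3):
--         pref = [0]
--         acc = 0
--         for p in range(n):
--             if s[p] == 'RGB'[(p + r) % 3]:
--                 acc += 1
--             pref.append(acc)
--         for i in range(n - k + 1):
--             w = pref[i + k] - pref[i]
--             if w > best:
--                 best = w
--     return k - best
-- ===== Notes on version B (the rewrite author's own statement) =====
-- stated objective: alternative
-- what changed: B precomputes, for each of the 3 RGB phases, a prefix-sum array of per-position pattern matches and answers each window's match count with one subtraction, instead of A's per-(window, phase) rescan of k characters.
import Mathlib
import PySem

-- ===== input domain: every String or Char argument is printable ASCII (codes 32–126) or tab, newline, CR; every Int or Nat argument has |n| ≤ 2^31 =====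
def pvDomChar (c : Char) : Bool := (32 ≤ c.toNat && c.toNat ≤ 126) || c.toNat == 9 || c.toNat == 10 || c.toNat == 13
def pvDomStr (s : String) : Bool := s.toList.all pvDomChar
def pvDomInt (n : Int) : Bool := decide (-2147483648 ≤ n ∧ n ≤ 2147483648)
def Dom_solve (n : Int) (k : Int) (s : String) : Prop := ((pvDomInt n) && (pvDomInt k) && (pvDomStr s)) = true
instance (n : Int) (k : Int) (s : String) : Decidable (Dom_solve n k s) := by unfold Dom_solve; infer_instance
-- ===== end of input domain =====

-- B replaces A's per-(window, phase) rescan by three prefix-sum arrays of per-position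
-- pattern matches, answering each window's match count with one subtraction.

-- the pattern 'RGB' as a list of characters (shared literal of both Pythons)
def rgb : List Char := ['R', 'G', 'B']

-- ===== PORT A =====
def solve (n : Int) (k : Int) (s : String) : Int :=
  let sl := s.toList
  let sf := PySem.List.pyRepeat rgb (k + 2)          -- sf = 'RGB' * (k + 2)
  let mx := (PySem.List.pyRange 0 (n - k + 1) 1).foldl (fun mx i =>
    (PySem.List.pyRange 0 3 1).foldl (fun mx j =>
      let count := (PySem.List.pyRange 0 k 1).foldl (fun c b =>
        if PySem.List.pyGet? sf (j + b) = PySem.List.pyGet? sl (i + b) then c + 1 else c)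
        (0 : Int)
      if count > mx then count else mx) mx) 0
  k - mx

-- ===== PORT B =====
def solve_alt (n : Int) (k : Int) (s : String) : Int :=
  if k ≤ 0 ∨ n < k then k
  else
    let sl := s.toList
    let best := (PySem.List.pyRange 0 3 1).foldl (fun best r =>
      -- build the prefix-sum array of phase-r matches: state = (pref, acc)
      let st := (PySem.List.pyRange 0 n 1).foldl (fun (st : List Int × Int) p =>
        let acc := if PySem.List.pyGet? sl p
                      = PySem.List.pyGet? rgb (PySem.Int.mod (p + r) 3)
                   then st.2 + 1 else st.2
        (st.1 ++ [acc], acc)) ([(0 : Int)], (0 : Int))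
      let pref := st.1
      (PySem.List.pyRange 0 (n - k + 1) 1).foldl (fun best i =>
        let w := PySem.List.pyGetD pref (i + k) 0 - PySem.List.pyGetD pref i 0
        if w > best then w else best) best) 0
    k - best

-- ===== PRECONDITION & SPEC =====
-- Pre_ excludes exactly the inputs where A raises IndexError: loops that run (k ≥ 1 and
-- n ≥ k) while s is shorter than n make s[i + b] reach index n - 1 ≥ len(s).
def Pre_solve (n : Int) (k : Int) (s : String) : Prop :=
  k ≤ 0 ∨ n < k ∨ n ≤ (s.toList.length : Int)
instance (n : Int) (k : Int) (s : String) : Decidable (Pre_solve n k s) := by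
  unfold Pre_solve; infer_instance

def pvWitness_solve : Int × Int × String := (5, 2, "RGBRG")

def Spec_solve (n : Int) (k : Int) (s : String) (out : Int) : Prop := out = solve_alt n k s
instance (n : Int) (k : Int) (s : String) (out : Int) : Decidable (Spec_solve n k s out) := by
  unfold Spec_solve; infer_instance

-- ===== CLAIM (what is proved, stated in full; the proofs are below) =====
def Claim_equal_solve : Prop := ∀ (n : Int) (k : Int) (s : String),
  Dom_solve n k s → Pre_solve n k s → Spec_solve n k s (solve n k s)

-- ===== LEMMAS AND PROOFS =====

-- a fold whose step fixes the accumulator value a returns a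
theorem foldl_fixed {α β : Type} (l : List α) (f : β → α → β) (a : β)
    (h : ∀ x ∈ l, f a x = a) : l.foldl f a = a := by
  induction l with
  | nil => rfl
  | cons x t ih =>
    simp only [List.foldl_cons, h x (List.mem_cons_self)]
    exact ih (fun y hy => h y (List.mem_cons_of_mem x hy))

theorem ite_gt_eq_max (a b : Int) : (if b > a then b else a) = max a b := by
  split_ifs with h <;> omega

-- phase-r match indicator at position p
def mtc (sl : List Char) (r p : Int) : Bool :=
  decide (PySem.List.pyGet? sl p = PySem.List.pyGet? rgb (PySem.Int.mod (p + r) 3))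

-- number of phase-r matches among positions 0..t-1
def S (sl : List Char) (r : Int) (t : Nat) : Int :=
  ((List.range t).countP (fun (p : Nat) => mtc sl r p) : Int)

-- match count of the window [i, i+K) at phase r
def win (sl : List Char) (r : Int) (i K : Nat) : Int := S sl r (i + K) - S sl r i

theorem S_add (sl : List Char) (r : Int) (i K : Nat) :
    S sl r (i + K) = S sl r i + ((List.range K).countP (fun (b : Nat) => mtc sl r ((i : Int) + b)) : Int) := by
  unfold S
  rw [List.range_add, List.countP_append, List.countP_map]
  push_cast
  rfl

-- indexing 'RGB' * m: position x reads rgb[x % 3]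
theorem sf_get (m : Nat) (x : Int) (h0 : 0 ≤ x) (h : x < 3 * m) :
    PySem.List.pyGet? ((List.replicate m rgb).flatten) x
      = PySem.List.pyGet? rgb (PySem.Int.mod x 3) := by
  induction m generalizing x with
  | zero => omega
  | succ m ih =>
    rw [List.replicate_succ, List.flatten_cons]
    by_cases hx : x < 3
    · have hmod : PySem.Int.mod x 3 = x := by
        rw [PySem.Int.mod_eq_emod_of_pos (by omega)]; omega
      rw [hmod, PySem.List.pyGet?_of_nonneg _ h0, PySem.List.pyGet?_of_nonneg _ h0]
      rw [List.getElem?_append_left (by simp [rgb]; omega)]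
    · have h3 : x = 3 + (x - 3) := by omega
      have hmod : PySem.Int.mod x 3 = PySem.Int.mod (x - 3) 3 := by
        rw [PySem.Int.mod_eq_emod_of_pos (by omega), PySem.Int.mod_eq_emod_of_pos (by omega)]
        omega
      rw [hmod, ← ih (x - 3) (by omega) (by omega)]
      rw [PySem.List.pyGet?_of_nonneg _ h0, PySem.List.pyGet?_of_nonneg _ (by omega)]
      rw [List.getElem?_append_right (by simp [rgb]; omega)]
      congr 1
      simp [rgb]
      omega

-- A's inner loop over b in range(k) is the phase-((j-i) mod 3) window count
theorem countA_eq (sl : List Char) (n k i j : Int)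
    (hk : 1 ≤ k) (hi : 0 ≤ i) (_hin : i < n - k + 1) (hj : 0 ≤ j) (hj3 : j < 3) :
    (PySem.List.pyRange 0 k 1).foldl (fun c b =>
        if PySem.List.pyGet? (PySem.List.pyRepeat rgb (k + 2)) (j + b)
           = PySem.List.pyGet? sl (i + b) then c + 1 else c) (0 : Int)
      = win sl (PySem.Int.mod (j - i) 3) i.toNat k.toNat := by
  rw [PySem.List.foldl_ite_add_one
    (p := fun b => PySem.List.pyGet? (PySem.List.pyRepeat rgb (k + 2)) (j + b)
           = PySem.List.pyGet? sl (i + b))]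
  rw [PySem.List.pyRange_one, List.countP_map]
  unfold win
  rw [S_add]
  have hK : (k - 0).toNat = k.toNat := by omega
  rw [hK]

  have hcnt : ∀ b ∈ List.range k.toNat,
      ((fun b => decide (PySem.List.pyGet? (PySem.List.pyRepeat rgb (k + 2)) (j + b)
           = PySem.List.pyGet? sl (i + b))) ∘ fun b : Nat => (0 : Int) + (b : Int)) b
      = mtc sl (PySem.Int.mod (j - i) 3) ((i.toNat : Int) + (b : Int)) := by
    intro b hb
    rw [List.mem_range] at hb
    have hbk : (b : Int) < k := by omega
    simp only [Function.comp, zero_add]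
    have hsf : PySem.List.pyGet? (PySem.List.pyRepeat rgb (k + 2)) (j + b)
        = PySem.List.pyGet? rgb (PySem.Int.mod (j + b) 3) := by
      unfold PySem.List.pyRepeat
      exact sf_get (k + 2).toNat (j + b) (by omega) (by omega)
    have hit : (i.toNat : Int) = i := by omega
    unfold mtc
    rw [hit]
    have hidx : PySem.Int.mod (i + (b : Int) + PySem.Int.mod (j - i) 3) 3
        = PySem.Int.mod (j + b) 3 := by
      rw [PySem.Int.mod_eq_emod_of_pos (by omega), PySem.Int.mod_eq_emod_of_pos (by omega),
        PySem.Int.mod_eq_emod_of_pos (by omega)]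
      omega
    rw [hsf, hidx]
    exact decide_eq_decide.mpr ⟨Eq.symm, Eq.symm⟩
  rw [List.countP_congr (by intro x hx; rw [hcnt x hx])]
  ring

-- B's prefix-sum loop invariant
theorem prefB_eq (sl : List Char) (r : Int) (m : Nat) :
    (PySem.List.pyRange 0 (m : Int) 1).foldl (fun (st : List Int × Int) p =>
        let acc := if PySem.List.pyGet? sl p
                      = PySem.List.pyGet? rgb (PySem.Int.mod (p + r) 3)
                   then st.2 + 1 else st.2
        (st.1 ++ [acc], acc)) ([(0 : Int)], (0 : Int))
      = ((List.range (m + 1)).map (fun t => S sl r t), S sl r m) := by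
  induction m with
  | zero => simp [PySem.List.pyRange_one_eq_nil, S]
  | succ m ih =>
    have hsplit : PySem.List.pyRange 0 ((m : Int) + 1) 1
        = PySem.List.pyRange 0 (m : Int) 1 ++ [(m : Int)] :=
      PySem.List.pyRange_one_succ_right (by omega)
    push_cast
    rw [hsplit, List.foldl_append, ih]
    simp only [List.foldl_cons, List.foldl_nil]
    have hS : S sl r (m + 1) = if mtc sl r (m : Int) then S sl r m + 1 else S sl r m := by
      unfold S
      rw [List.range_succ, List.countP_append]
      by_cases hm : mtc sl r (m : Int) <;> simp [hm]
    have hstep : (if PySem.List.pyGet? sl (m : Int)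
          = PySem.List.pyGet? rgb (PySem.Int.mod ((m : Int) + r) 3)
        then S sl r m + 1 else S sl r m) = S sl r (m + 1) := by
      rw [hS]; unfold mtc; split_ifs with h1 h2 <;> simp_all
    simp only [hstep]
    rw [List.range_succ (n := m + 1), List.map_append]
    simp

-- B's window read: pref[i+k] - pref[i] is the phase-r window count
theorem winB_eq (sl : List Char) (r : Int) (n k i : Int)
    (hk : 1 ≤ k) (hkn : k ≤ n) (hi : 0 ≤ i) (hin : i < n - k + 1) :
    PySem.List.pyGetD ((List.range (n.toNat + 1)).map (fun t => S sl r t)) (i + k) 0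
      - PySem.List.pyGetD ((List.range (n.toNat + 1)).map (fun t => S sl r t)) i 0
      = win sl r i.toNat k.toNat := by
  have hlen : (((List.range (n.toNat + 1)).map (fun t => S sl r t)).length : Int)
      = (n.toNat : Int) + 1 := by simp
  rw [PySem.List.pyGetD_eq_getElem _ _ (by omega) (by rw [hlen]; omega),
      PySem.List.pyGetD_eq_getElem _ _ (by omega) (by rw [hlen]; omega)]
  simp only [List.getElem_map, List.getElem_range]
  unfold win
  have : (i + k).toNat = i.toNat + k.toNat := by omega
  rw [this]

-- fold-of-max monotone under list-membership inclusion
theorem foldl_max_le {l1 l2 : List Int} (a : Int) (h : ∀ x ∈ l1, x ∈ l2) :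
    l1.foldl max a ≤ l2.foldl max a := by
  rcases PySem.List.foldl_max_mem l1 a with he | hm
  · rw [he]; exact (PySem.List.le_foldl_max l2 a).1
  · exact (PySem.List.le_foldl_max l2 a).2 _ (h _ hm)

theorem solve_spec : Claim_equal_solve := by
  intro n k s _hdom hpre
  unfold Spec_solve solve solve_alt
  simp only []
  by_cases hdeg : k ≤ 0 ∨ n < k
  · -- degenerate: no window loop runs in A; B returns k directly
    rw [if_pos hdeg]
    have hmx : (PySem.List.pyRange 0 (n - k + 1) 1).foldl (fun mx i =>
        (PySem.List.pyRange 0 3 1).foldl (fun mx j =>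
          let count := (PySem.List.pyRange 0 k 1).foldl (fun c b =>
            if PySem.List.pyGet? (PySem.List.pyRepeat rgb (k + 2)) (j + b)
               = PySem.List.pyGet? s.toList (i + b) then c + 1 else c) (0 : Int)
          if count > mx then count else mx) mx) (0 : Int) = 0 := by
      rcases hdeg with hk | hn
      · -- k ≤ 0: every inner count is 0 and the maxima stay 0
        apply foldl_fixed
        intro i _
        apply foldl_fixed
        intro j _
        simp [PySem.List.pyRange_one_eq_nil hk]
      · -- n < k: the window range is empty
        rw [PySem.List.pyRange_one_eq_nil (a := 0) (b := n - k + 1) (by omega)]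
        rfl
    rw [hmx]; ring
  · rw [if_neg hdeg]
    rw [not_or, not_le, not_lt] at hdeg
    obtain ⟨hk0, hkn⟩ := hdeg
    have hk : 1 ≤ k := by omega
    have hlen : n ≤ (s.toList.length : Int) := by
      unfold Pre_solve at hpre; omega
    set sl := s.toList with hsl
    congr 1
    -- rewrite A's nested fold as a max-fold over a flat list of window values
    have hA : (PySem.List.pyRange 0 (n - k + 1) 1).foldl (fun mx i =>
        (PySem.List.pyRange 0 3 1).foldl (fun mx j =>
          let count := (PySem.List.pyRange 0 k 1).foldl (fun c b =>
            if PySem.List.pyGet? (PySem.List.pyRepeat rgb (k + 2)) (j + b)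
               = PySem.List.pyGet? sl (i + b) then c + 1 else c) (0 : Int)
          if count > mx then count else mx) mx) (0 : Int)
        = ((PySem.List.pyRange 0 (n - k + 1) 1).flatMap (fun i =>
            (PySem.List.pyRange 0 3 1).map (fun j =>
              win sl (PySem.Int.mod (j - i) 3) i.toNat k.toNat))).foldl max 0 := by
      rw [List.foldl_flatMap]
      apply PySem.List.foldl_congr_mem
      intro acc i hi
      rw [List.foldl_map]
      apply PySem.List.foldl_congr_mem
      intro acc2 j hj
      rw [PySem.List.mem_pyRange_one] at hi hj
      simp only []
      rw [countA_eq sl n k i j hk hi.1 hi.2 hj.1 hj.2, ite_gt_eq_max]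
    -- rewrite B's nested fold likewise
    have hB : (PySem.List.pyRange 0 3 1).foldl (fun best r =>
        let st := (PySem.List.pyRange 0 n 1).foldl (fun (st : List Int × Int) p =>
          let acc := if PySem.List.pyGet? sl p
                        = PySem.List.pyGet? rgb (PySem.Int.mod (p + r) 3)
                     then st.2 + 1 else st.2
          (st.1 ++ [acc], acc)) ([(0 : Int)], (0 : Int))
        let pref := st.1
        (PySem.List.pyRange 0 (n - k + 1) 1).foldl (fun best i =>
          let w := PySem.List.pyGetD pref (i + k) 0 - PySem.List.pyGetD pref i 0
          if w > best then w else best) best) (0 : Int)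
        = ((PySem.List.pyRange 0 3 1).flatMap (fun r =>
            (PySem.List.pyRange 0 (n - k + 1) 1).map (fun i =>
              win sl r i.toNat k.toNat))).foldl max 0 := by
      rw [List.foldl_flatMap]
      apply PySem.List.foldl_congr_mem
      intro acc r _
      have hn : n = ((n.toNat : Int)) := by omega
      rw [hn, prefB_eq sl r n.toNat]
      rw [List.foldl_map]
      apply PySem.List.foldl_congr_mem
      intro acc2 i hi
      rw [PySem.List.mem_pyRange_one] at hi
      simp only []
      rw [winB_eq sl r n k i hk hkn hi.1 (by omega), ite_gt_eq_max]
    rw [hA, hB]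
    -- the two flat lists have the same members (phase reindexing j ↦ (j - i) mod 3)
    apply le_antisymm
    · apply foldl_max_le
      intro x hx
      simp only [List.mem_flatMap, List.mem_map, PySem.List.mem_pyRange_one] at hx ⊢
      obtain ⟨i, hi, j, hj, hx⟩ := hx
      exact ⟨PySem.Int.mod (j - i) 3,
        ⟨PySem.Int.mod_nonneg _ (by omega), PySem.Int.mod_lt _ (by omega)⟩, i, hi, hx⟩
    · apply foldl_max_le
      intro x hx
      simp only [List.mem_flatMap, List.mem_map, PySem.List.mem_pyRange_one] at hx ⊢
      obtain ⟨r, hr, i, hi, hx⟩ := hx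
      refine ⟨i, hi, PySem.Int.mod (r + i) 3,
        ⟨PySem.Int.mod_nonneg _ (by omega), PySem.Int.mod_lt _ (by omega)⟩, ?_⟩
      have : PySem.Int.mod (PySem.Int.mod (r + i) 3 - i) 3 = r := by
        rw [PySem.Int.mod_eq_emod_of_pos (by omega), PySem.Int.mod_eq_emod_of_pos (by omega)]
        omega
      rw [this]
      exact hx
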